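-- pv_equiv track=rewrite | github.com/josephmate/AdventOfCode2019 | 10/MonitoringStation.py | getMaxRC
-- ===== SOURCE A (Python) =====
-- def getMaxRC(coords):
--     maxR = 0
--     maxC = 0
--     for (r, c) in coords:
--         if r > maxR:
--             maxR = r
--         if c > maxC:
--             maxC = c
--     return maxR, maxC
-- ===== SOURCE B (Python) =====
-- def getMaxRC(coords):
--     pairs = list(coords)
--     rs = sorted([r for r, _ in pairs] + [0])
--     cs = sorted([c for _, c in pairs] + [0])
--     return rs[-1], cs[-1]
-- ===== Notes on version B (the rewrite author's own statement) =====
-- stated objective: alternative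
-- what changed: Replaces the fused two-accumulator scanning loop with a sort-then-take-last strategy: each axis's coordinates (with 0 appended to keep the floor-at-0 seed) are sorted and the last element of each sorted list is returned.
import Mathlib
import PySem

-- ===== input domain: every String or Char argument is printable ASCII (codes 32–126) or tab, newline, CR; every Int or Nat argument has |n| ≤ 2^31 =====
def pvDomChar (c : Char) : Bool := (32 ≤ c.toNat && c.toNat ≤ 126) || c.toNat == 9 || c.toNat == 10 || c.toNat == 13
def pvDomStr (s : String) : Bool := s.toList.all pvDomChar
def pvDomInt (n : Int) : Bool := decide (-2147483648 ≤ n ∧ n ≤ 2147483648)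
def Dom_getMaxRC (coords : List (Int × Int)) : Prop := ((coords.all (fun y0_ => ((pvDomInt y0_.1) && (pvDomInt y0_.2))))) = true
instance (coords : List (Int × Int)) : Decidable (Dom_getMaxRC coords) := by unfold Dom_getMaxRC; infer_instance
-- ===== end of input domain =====

-- B replaces A's fused two-accumulator scan by sort-then-take-last per axis, with 0 appended to keep the floor-at-0 seed (objective: alternative).

-- ===== PORT A =====
def getMaxRC (coords : List (Int × Int)) : Int × Int :=
  coords.foldl
    (fun s p =>
      let maxR := if p.1 > s.1 then p.1 else s.1
      let maxC := if p.2 > s.2 then p.2 else s.2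
      (maxR, maxC))
    (0, 0)

-- ===== PORT B =====
def getMaxRC_alt (coords : List (Int × Int)) : Int × Int :=
  let pairs := coords
  let rs := PySem.List.sorted (pairs.map (fun p => p.1) ++ [0]) (fun y => y) false
  let cs := PySem.List.sorted (pairs.map (fun p => p.2) ++ [0]) (fun y => y) false
  -- rs/cs are nonempty (they contain the appended 0), so rs[-1]/cs[-1] never raise; .getD 0 only totalises
  ((PySem.List.pyGet? rs (-1)).getD 0, (PySem.List.pyGet? cs (-1)).getD 0)

-- ===== PRECONDITION & SPEC =====
def Spec_getMaxRC (coords : List (Int × Int)) (out : Int × Int) : Prop := out = getMaxRC_alt coords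
instance (coords : List (Int × Int)) (out : Int × Int) : Decidable (Spec_getMaxRC coords out) := by unfold Spec_getMaxRC; infer_instance

-- ===== CLAIM (what is proved, stated in full; the proofs are below) =====
def Claim_equal_getMaxRC : Prop := ∀ (coords : List (Int × Int)), Dom_getMaxRC coords → Spec_getMaxRC coords (getMaxRC coords)

-- ===== LEMMAS AND PROOFS =====

theorem pv_le_foldl_max (xs : List Int) (a : Int) : a ≤ xs.foldl max a := by
  induction xs generalizing a with
  | nil => exact le_refl a
  | cons x t ih => exact le_trans (le_max_left a x) (ih (max a x))

theorem pv_foldl_max_ub (xs : List Int) (a : Int) : ∀ x ∈ xs, x ≤ xs.foldl max a := by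
  induction xs generalizing a with
  | nil => intro x hx; cases hx
  | cons y t ih =>
      intro x hx
      rcases List.mem_cons.mp hx with h | h
      · subst h
        exact le_trans (le_max_right a x) (pv_le_foldl_max t (max a x))
      · exact ih (max a y) x h

theorem pv_foldl_max_mem (xs : List Int) (a : Int) :
    xs.foldl max a = a ∨ xs.foldl max a ∈ xs := by
  induction xs generalizing a with
  | nil => exact Or.inl rfl
  | cons x t ih =>
      rcases ih (max a x) with h | h
      · simp only [List.foldl_cons, h]
        rcases max_choice a x with h' | h'
        · exact Or.inl h'
        · exact Or.inr (by rw [h']; exact List.mem_cons_self ..)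
      · exact Or.inr (List.mem_cons_of_mem _ h)

theorem pv_sorted_le_last (l : List Int)
    (hne : PySem.List.sorted l (fun y => y) false ≠ []) :
    ∀ x ∈ PySem.List.sorted l (fun y => y) false,
      x ≤ (PySem.List.sorted l (fun y => y) false).getLast hne := by
  intro x hx
  obtain ⟨p, hp, hxp⟩ := List.mem_iff_getElem.mp hx
  rw [List.getLast_eq_getElem, ← hxp]
  apply PySem.List.sorted_id_getElem_mono
  all_goals omega

-- last of sorted(xs ++ [0]) = A's running max seeded at 0
theorem pv_sorted_last (xs : List Int) :
    (PySem.List.pyGet? (PySem.List.sorted (xs ++ [0]) (fun y => y) false) (-1)).getD 0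
      = xs.foldl max 0 := by
  set s := PySem.List.sorted (xs ++ [0]) (fun y => y) false with hs
  have hne : s ≠ [] := by
    rw [hs, Ne, PySem.List.sorted_eq_nil_iff]
    simp
  rw [PySem.List.pyGet?_neg_one, List.getLast?_eq_some_getLast hne, Option.getD_some]
  set m := s.getLast hne with hm
  have hmem_s : ∀ x, x ∈ s ↔ x ∈ xs ++ [0] := fun x => PySem.List.mem_sorted _ _ _ x
  -- every element of s is ≤ its last element, by sortedness
  have hub : ∀ x ∈ s, x ≤ m := pv_sorted_le_last (xs ++ [0]) hne
  have hF := pv_foldl_max_mem xs 0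
  have hmF : m ≤ xs.foldl max 0 := by
    have : m ∈ xs ++ [0] := (hmem_s m).mp (List.getLast_mem hne)
    rcases List.mem_append.mp this with h | h
    · exact pv_foldl_max_ub xs 0 m h
    · simp only [List.mem_singleton] at h
      rw [h]; exact pv_le_foldl_max xs 0
  have hFm : xs.foldl max 0 ≤ m := by
    apply hub
    rw [hmem_s]
    rcases hF with h | h
    · rw [h]; simp
    · exact List.mem_append_left _ h
  omega

theorem pv_fold_split (coords : List (Int × Int)) (r c : Int) :
    coords.foldl
      (fun s p =>
        let maxR := if p.1 > s.1 then p.1 else s.1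
        let maxC := if p.2 > s.2 then p.2 else s.2
        (maxR, maxC)) (r, c)
    = (coords.foldl (fun m p => max m p.1) r,
       coords.foldl (fun m p => max m p.2) c) := by
  induction coords generalizing r c with
  | nil => rfl
  | cons p t ih =>
      simp only [List.foldl_cons]
      rw [ih]
      congr 1 <;> congr 1 <;> simp [max_def] <;> omega

-- ===== VERDICT (by name: the statement is the Claim_ definition above) =====
theorem getMaxRC_spec : Claim_equal_getMaxRC := by
  intro coords _
  unfold Spec_getMaxRC getMaxRC getMaxRC_alt
  rw [pv_fold_split]
  simp only [pv_sorted_last, List.foldl_map]
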